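-- pv_equiv track=rewrite | github.com/sergioMRSD/CLFS | CLFS_validator.py | _get_member_column_groups
-- ===== SOURCE A (Python) =====
-- from typing import Optional
--
-- def _normalize_header(text: object) -> str:
--     if text is None:
--         return ""
--     return str(text).strip().lower()
--
-- def _column_matches(col_name: object, target: str) -> bool:
--     col_norm = _normalize_header(col_name)
--     target_norm = _normalize_header(target)
--     return target_norm == col_norm or target_norm in col_norm
--
-- def _find_column_indices(columns: list, target: str) -> list[int]:
--     return [i for i, col in enumerate(columns) if _column_matches(col, target)]
--
-- def _get_member_column_groups(columns: list[str]) -> list[dict[str, Optional[int]]]: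
--     full_name_indices = _find_column_indices(columns, "Full Name")
--     dob_indices = _find_column_indices(columns, "Date of Birth (DD/MM/YYYY)")
--
--     groups: list[dict[str, Optional[int]]] = []
--     for idx, full_name_idx in enumerate(full_name_indices):
--         next_full_name_idx = (
--             full_name_indices[idx + 1] if idx + 1 < len(full_name_indices) else len(columns)
--         )
--         dob_idx = next(
--             (i for i in dob_indices if full_name_idx < i < next_full_name_idx),
--             None,
--         )
--         groups.append({"full_name_idx": full_name_idx, "dob_idx": dob_idx})
--
--     return groups
-- ===== SOURCE B (Python) =====
-- def _get_member_column_groups(columns):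
--     groups = []  # [full_name_idx, dob_idx] pairs; the newest one may be filled in place
--     for i, col in enumerate(columns):
--         name = "" if col is None else str(col).strip().lower()
--         if "full name" in name:
--             groups.append([i, None])
--         elif "date of birth (dd/mm/yyyy)" in name and groups and groups[-1][1] is None:
--             groups[-1][1] = i
--     return [{"full_name_idx": f, "dob_idx": d} for f, d in groups]
-- ===== Notes on version B (the rewrite author's own statement) =====
-- stated objective: faster
-- what changed: A precomputes the two index lists and then, for every full-name column, scans the whole date-of-birth index list (and indexes ahead into the full-name list); B makes one left-to-right pass over the columns, opening a group at each full-name column and filling the newest still-empty group at the first following date-of-birth column.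
import Mathlib
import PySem

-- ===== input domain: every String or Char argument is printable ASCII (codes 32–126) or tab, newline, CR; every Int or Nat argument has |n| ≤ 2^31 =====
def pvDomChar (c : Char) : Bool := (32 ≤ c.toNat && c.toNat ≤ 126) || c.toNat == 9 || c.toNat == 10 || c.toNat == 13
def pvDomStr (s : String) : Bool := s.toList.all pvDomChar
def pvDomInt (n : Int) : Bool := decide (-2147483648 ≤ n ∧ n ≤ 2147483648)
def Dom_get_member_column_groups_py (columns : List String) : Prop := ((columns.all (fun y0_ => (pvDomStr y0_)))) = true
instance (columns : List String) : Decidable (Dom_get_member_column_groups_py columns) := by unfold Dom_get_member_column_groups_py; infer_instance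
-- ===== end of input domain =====

-- B replaces A's quadratic pairing of precomputed index lists by a single left-to-right pass
-- over the columns that opens a group at each full-name column and fills the newest open
-- group at the first following date-of-birth column (objective: faster, one pass).


-- ===== PORT A =====
-- _normalize_header (the argument is always a str here, so the None branch is dead)
def pvNorm (s : String) : String := PySem.Str.lower (PySem.Str.strip s)

-- _column_matches
def pvMatches (col target : String) : Bool :=
  let c := pvNorm col
  let t := pvNorm target
  (t == c) || PySem.Str.isIn t c

-- _find_column_indices
def pvFindColumnIndices (columns : List String) (target : String) : List Int :=
  (PySem.List.enumerate columns 0).filterMap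
    (fun p => if pvMatches p.2 target then some p.1 else none)

def get_member_column_groups_py (columns : List String) : List (List (String × Option Int)) :=
  let fns := pvFindColumnIndices columns "Full Name"
  let dobs := pvFindColumnIndices columns "Date of Birth (DD/MM/YYYY)"
  (PySem.List.enumerate fns 0).foldl (fun groups p =>
    let nxt : Int :=
      if p.1 + 1 < (fns.length : Int) then PySem.List.pyGetD fns (p.1 + 1) 0
      else (columns.length : Int)
    let dob : Option Int := dobs.find? (fun i => decide (p.2 < i) && decide (i < nxt))
    groups ++ [[("full_name_idx", some p.2), ("dob_idx", dob)]]) []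

-- ===== PORT B =====
-- groups[-1][1] = i, guarded by 'groups and groups[-1][1] is None' (list kept reversed: last group is the head)
def pvDobUpd (i : Int) (acc : List (Int × Option Int)) : List (Int × Option Int) :=
  match acc with
  | (f, none) :: rest => (f, some i) :: rest
  | _ => acc

-- body of B's single for-loop over enumerate(columns); acc holds the [f, d] pairs, newest first
def pvBStep (acc : List (Int × Option Int)) (p : Int × String) : List (Int × Option Int) :=
  let name := PySem.Str.lower (PySem.Str.strip p.2)
  if PySem.Str.isIn "full name" name then (p.1, none) :: acc
  else if PySem.Str.isIn "date of birth (dd/mm/yyyy)" name then pvDobUpd p.1 acc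
  else acc

def get_member_column_groups_py_alt (columns : List String) : List (List (String × Option Int)) :=
  (((PySem.List.enumerate columns 0).foldl pvBStep []).reverse).map
    (fun g => [("full_name_idx", some g.1), ("dob_idx", g.2)])

-- ===== PRECONDITION & SPEC =====
def Spec_get_member_column_groups_py (columns : List String) (out : List (List (String × Option Int))) : Prop := out = get_member_column_groups_py_alt columns
instance (columns : List String) (out : List (List (String × Option Int))) : Decidable (Spec_get_member_column_groups_py columns out) := by unfold Spec_get_member_column_groups_py; infer_instance

-- ===== CLAIM (what is proved, stated in full; the proofs are below) =====
def Claim_equal_get_member_column_groups_py : Prop := ∀ (columns : List String), Dom_get_member_column_groups_py columns → Spec_get_member_column_groups_py columns (get_member_column_groups_py columns)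

-- ===== LEMMAS AND PROOFS =====

-- A's groups as (full_name_idx, dob_idx) pairs, computed by recursion on the full-name index list
def pvAPairs : List Int → List Int → Int → List (Int × Option Int)
  | [], _, _ => []
  | [f], dobs, N => [(f, dobs.find? (fun i => decide (f < i) && decide (i < N)))]
  | f :: f' :: rest, dobs, N =>
      (f, dobs.find? (fun i => decide (f < i) && decide (i < f'))) :: pvAPairs (f' :: rest) dobs N

theorem pvFind?_congr {p q : Int → Bool} {l : List Int} (h : ∀ a ∈ l, p a = q a) :
    l.find? p = l.find? q := by
  induction l with
  | nil => rfl
  | cons x xs ih =>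
    simp only [List.find?_cons]
    rw [h x (by simp)]
    cases q x <;> simp [ih (fun a ha => h a (by simp [ha]))]

theorem pvOr_isIn (t c : String) : ((t == c) || PySem.Str.isIn t c) = PySem.Str.isIn t c := by
  cases h : (t == c)
  · simp
  · have ht : t = c := by simpa using h
    subst ht
    rw [Bool.true_or]
    symm
    rw [PySem.Str.isIn_iff_infix]

theorem pvMatches_full (c : String) :
    pvMatches c "Full Name" = PySem.Str.isIn "full name" (pvNorm c) := by
  have h : pvNorm "Full Name" = "full name" := by decide
  simp only [pvMatches, h, pvOr_isIn]

theorem pvMatches_dob (c : String) :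
    pvMatches c "Date of Birth (DD/MM/YYYY)" = PySem.Str.isIn "date of birth (dd/mm/yyyy)" (pvNorm c) := by
  have h : pvNorm "Date of Birth (DD/MM/YYYY)" = "date of birth (dd/mm/yyyy)" := by decide
  simp only [pvMatches, h, pvOr_isIn]

theorem pvAPairs_succ (fns dobs : List Int) (N : Int) (hd : ∀ i ∈ dobs, i < N) :
    pvAPairs fns dobs (N + 1) = pvAPairs fns dobs N := by
  induction fns with
  | nil => rfl
  | cons f rest ih =>
    cases rest with
    | nil =>
      simp only [pvAPairs]
      rw [pvFind?_congr (fun i hi => ?_)]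
      have h1 : i < N := hd i hi
      have h2 : i < N + 1 := by omega
      simp [h1, h2]
    | cons f' rest' =>
      simp only [pvAPairs]
      rw [ih]

theorem pvAPairs_full (fns dobs dtail : List Int) (N : Int)
    (hf : ∀ f ∈ fns, f < N) (hd : ∀ i ∈ dobs, i < N) (hdt : ∀ i ∈ dtail, i = N) :
    pvAPairs (fns ++ [N]) (dobs ++ dtail) (N + 1) = pvAPairs fns dobs N ++ [(N, none)] := by
  have hlast : (dobs ++ dtail).find? (fun i => decide (N < i) && decide (i < N + 1)) = none := by
    rw [List.find?_eq_none]
    intro i hi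
    rcases List.mem_append.1 hi with h | h
    · have h1 : i < N := hd i h
      have : ¬ (N < i) := by omega
      simp [this]
    · rw [hdt i h]; simp
  induction fns with
  | nil =>
    simp only [List.nil_append, pvAPairs]
    rw [hlast]
  | cons f rest ih =>
    cases rest with
    | nil =>
      have hfN : f < N := hf f (by simp)
      simp only [List.cons_append, List.nil_append, pvAPairs]
      have h1 : (dobs ++ dtail).find? (fun i => decide (f < i) && decide (i < N)) =
          dobs.find? (fun i => decide (f < i) && decide (i < N)) := by
        rw [List.find?_append]
        have hdt' : dtail.find? (fun i => decide (f < i) && decide (i < N)) = none := by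
          rw [List.find?_eq_none]
          intro i hi
          rw [hdt i hi]; simp
        rw [hdt']
        cases dobs.find? (fun i => decide (f < i) && decide (i < N)) <;> rfl
      rw [h1, hlast]
    | cons f' rest' =>
      have hf' : f' < N := hf f' (by simp)
      have hstep := ih (fun g hg => hf g (by simp [hg]))
      simp only [List.cons_append] at hstep ⊢
      simp only [pvAPairs] at hstep ⊢
      rw [hstep]
      have h1 : (dobs ++ dtail).find? (fun i => decide (f < i) && decide (i < f')) =
          dobs.find? (fun i => decide (f < i) && decide (i < f')) := by
        rw [List.find?_append]
        have hdt' : dtail.find? (fun i => decide (f < i) && decide (i < f')) = none := by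
          rw [List.find?_eq_none]
          intro i hi
          rw [hdt i hi]
          have : ¬ (N < f') := by omega
          simp [this]
        rw [hdt']
        cases dobs.find? (fun i => decide (f < i) && decide (i < f')) <;> rfl
      rw [h1]
      simp

theorem pvAPairs_ne_nil (fns dobs : List Int) (N : Int) (h : fns ≠ []) :
    pvAPairs fns dobs N ≠ [] := by
  cases fns with
  | nil => exact absurd rfl h
  | cons f rest => cases rest <;> simp [pvAPairs]

theorem pvAPairs_dob (fns dobs : List Int) (N : Int)
    (hf : ∀ f ∈ fns, f < N) (hd : ∀ i ∈ dobs, i < N) :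
    (pvAPairs fns (dobs ++ [N]) (N + 1)).reverse = pvDobUpd N ((pvAPairs fns dobs N).reverse) := by
  induction fns with
  | nil => rfl
  | cons f rest ih =>
    cases rest with
    | nil =>
      have hfN : f < N := hf f (by simp)
      simp only [pvAPairs, List.reverse_singleton]
      rw [List.find?_append]
      have h1 : [N].find? (fun i => decide (f < i) && decide (i < N + 1)) = some N := by
        have h2 : N < N + 1 := by omega
        simp [hfN]
      rw [h1]
      rw [pvFind?_congr (l := dobs) (q := fun i => decide (f < i) && decide (i < N)) (fun i hi => ?_)]
      · cases hfind : dobs.find? (fun i => decide (f < i) && decide (i < N)) <;>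
          simp [pvDobUpd, Option.or]
      · have h1 : i < N := hd i hi
        have h2 : i < N + 1 := by omega
        simp [h1, h2]
    | cons f' rest' =>
      have hf' : f' < N := hf f' (by simp)
      have hstep := ih (fun g hg => hf g (by simp [hg]))
      simp only [pvAPairs, List.reverse_cons]
      rw [List.find?_append]
      have h0 : [N].find? (fun i => decide (f < i) && decide (i < f')) = none := by
        have : ¬ (N < f') := by omega
        simp [this]
      rw [h0]
      have h1 : (dobs.find? (fun i => decide (f < i) && decide (i < f'))).or none
          = dobs.find? (fun i => decide (f < i) && decide (i < f')) := by
        cases dobs.find? (fun i => decide (f < i) && decide (i < f')) <;> rfl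
      rw [h1, hstep]
      -- the old tail is nonempty, so its reverse is a cons and pvDobUpd commutes with ++ [head]
      have hne : pvAPairs (f' :: rest') dobs N ≠ [] := pvAPairs_ne_nil _ _ _ (by simp)
      obtain ⟨q, qs, hq⟩ : ∃ q qs, (pvAPairs (f' :: rest') dobs N).reverse = q :: qs := by
        cases hrev : (pvAPairs (f' :: rest') dobs N).reverse with
        | nil => exact absurd (by simpa using hrev) hne
        | cons q qs => exact ⟨q, qs, rfl⟩
      rw [hq]
      obtain ⟨g, d⟩ := q
      cases d <;> simp [pvDobUpd]

theorem pvAPairs_length (fns dobs : List Int) (N : Int) :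
    (pvAPairs fns dobs N).length = fns.length := by
  induction fns with
  | nil => rfl
  | cons f rest ih =>
    cases rest with
    | nil => simp [pvAPairs]
    | cons f' rest' => simp only [pvAPairs, List.length_cons] at ih ⊢; omega

theorem pvAPairs_getElem (fns dobs : List Int) (N : Int) (k : Nat) (hk : k < fns.length) :
    (pvAPairs fns dobs N)[k]'(by rw [pvAPairs_length]; exact hk) =
      (fns[k], dobs.find? (fun i => decide (fns[k] < i) &&
        decide (i < if h : k + 1 < fns.length then fns[k + 1] else N))) := by
  induction fns generalizing k with
  | nil => simp at hk
  | cons f rest ih =>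
    cases rest with
    | nil =>
      have hk0 : k = 0 := by simpa [Nat.lt_one_iff] using hk
      subst hk0
      simp [pvAPairs]
      rfl
    | cons f' rest' =>
      cases k with
      | zero =>
        simp [pvAPairs]
        rfl
      | succ k' =>
        have hk' : k' < (f' :: rest').length := by simpa using hk
        have hrec := ih k' hk'
        have hidx : (pvAPairs (f :: f' :: rest') dobs N)[k' + 1]'(by rw [pvAPairs_length]; exact hk) =
            (pvAPairs (f' :: rest') dobs N)[k']'(by rw [pvAPairs_length]; exact hk') := by
          simp [pvAPairs]
        rw [hidx, hrec]
        by_cases h : k' + 1 < (f' :: rest').length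
        · have h2 : k' + 1 + 1 < (f :: f' :: rest').length := by simpa using h
          simp only [dif_pos h, dif_pos h2]
          rfl
        · have h2 : ¬ (k' + 1 + 1 < (f :: f' :: rest').length) := by simpa using h
          simp only [dif_neg h, dif_neg h2]
          rfl

theorem pvFindColumnIndices_mem (columns : List String) (t : String) (x : Int)
    (hx : x ∈ pvFindColumnIndices columns t) : 0 ≤ x ∧ x < (columns.length : Int) := by
  simp only [pvFindColumnIndices, List.mem_filterMap] at hx
  obtain ⟨p, hp, hpx⟩ := hx
  rw [PySem.List.mem_enumerate_iff] at hp
  obtain ⟨k, hk, rfl⟩ := hp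
  by_cases h : pvMatches (columns[k]) t
  · simp [h] at hpx
    omega
  · simp [h] at hpx

theorem pvFindColumnIndices_append (columns : List String) (c : String) (t : String) :
    pvFindColumnIndices (columns ++ [c]) t =
      pvFindColumnIndices columns t ++
        (if pvMatches c t then [(columns.length : Int)] else []) := by
  by_cases h : pvMatches c t <;>
    simp [pvFindColumnIndices, PySem.List.enumerate_append, List.filterMap_append,
      PySem.List.enumerate_cons, PySem.List.enumerate_nil, h]

-- one loop step of B, described on A's pair lists
theorem pvStep (fns dobs : List Int) (N : Int) (c : String)
    (hf : ∀ f ∈ fns, f < N) (hd : ∀ i ∈ dobs, i < N) :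
    pvBStep ((pvAPairs fns dobs N).reverse) (N, c) =
      (pvAPairs (fns ++ (if pvMatches c "Full Name" then [N] else []))
        (dobs ++ (if pvMatches c "Date of Birth (DD/MM/YYYY)" then [N] else []))
        (N + 1)).reverse := by
  have hbf : PySem.Str.isIn "full name" (PySem.Str.lower (PySem.Str.strip c)) =
      pvMatches c "Full Name" := (pvMatches_full c).symm
  have hbd : PySem.Str.isIn "date of birth (dd/mm/yyyy)" (PySem.Str.lower (PySem.Str.strip c)) =
      pvMatches c "Date of Birth (DD/MM/YYYY)" := (pvMatches_dob c).symm
  simp only [pvBStep]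
  rw [hbf, hbd]
  by_cases h1 : pvMatches c "Full Name" = true
  · rw [if_pos h1, if_pos h1]
    rw [pvAPairs_full fns dobs _ N hf hd
      (by by_cases h2 : pvMatches c "Date of Birth (DD/MM/YYYY)" = true <;> simp [h2])]
    simp
  · rw [if_neg h1, if_neg h1, List.append_nil]
    by_cases h2 : pvMatches c "Date of Birth (DD/MM/YYYY)" = true
    · rw [if_pos h2, if_pos h2]
      exact (pvAPairs_dob fns dobs N hf hd).symm
    · rw [if_neg h2, if_neg h2, List.append_nil]
      rw [pvAPairs_succ fns dobs N hd]

-- the single pass computes exactly A's pairs, reversed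
theorem pvMainFold (columns : List String) :
    (PySem.List.enumerate columns 0).foldl pvBStep [] =
      (pvAPairs (pvFindColumnIndices columns "Full Name")
        (pvFindColumnIndices columns "Date of Birth (DD/MM/YYYY)")
        (columns.length : Int)).reverse := by
  induction columns using List.reverseRecOn with
  | nil => rfl
  | append_singleton cols c ih =>
    have henum : PySem.List.enumerate (cols ++ [c]) 0 =
        PySem.List.enumerate cols 0 ++ [((cols.length : Int), c)] := by
      rw [PySem.List.enumerate_append]
      simp [PySem.List.enumerate_cons, PySem.List.enumerate_nil]
    have hlen : (((cols ++ [c]).length : Nat) : Int) = (cols.length : Int) + 1 := by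
      simp
    rw [henum, List.foldl_append, ih]
    simp only [List.foldl_cons, List.foldl_nil]
    rw [pvFindColumnIndices_append, pvFindColumnIndices_append, hlen]
    exact pvStep _ _ _ c
      (fun f hf => (pvFindColumnIndices_mem cols _ f hf).2)
      (fun i hi => (pvFindColumnIndices_mem cols _ i hi).2)

-- A's foldl builds exactly the dict rendering of pvAPairs
theorem pvABridge (columns : List String) :
    get_member_column_groups_py columns =
      (pvAPairs (pvFindColumnIndices columns "Full Name")
        (pvFindColumnIndices columns "Date of Birth (DD/MM/YYYY)")
        (columns.length : Int)).map
        (fun g => [("full_name_idx", some g.1), ("dob_idx", g.2)]) := by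
  unfold get_member_column_groups_py
  rw [PySem.List.foldl_append_singleton_eq_map]
  apply List.ext_getElem
  · simp [pvAPairs_length]
  · intro k hk1 hk2
    have hk : k < (pvFindColumnIndices columns "Full Name").length := by
      simpa [pvAPairs_length] using hk2
    simp only [List.nil_append, List.getElem_map, PySem.List.getElem_enumerate, zero_add]
    rw [pvAPairs_getElem _ _ _ k hk]
    have hbound : (if ((k : Int) + 1 < ((pvFindColumnIndices columns "Full Name").length : Int))
          then PySem.List.pyGetD (pvFindColumnIndices columns "Full Name") ((k : Int) + 1) 0
          else ((columns.length : Nat) : Int)) =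
        (if h : k + 1 < (pvFindColumnIndices columns "Full Name").length
          then (pvFindColumnIndices columns "Full Name")[k + 1]
          else ((columns.length : Nat) : Int)) := by
      have hcast : (k : Int) + 1 = ((k + 1 : Nat) : Int) := by push_cast; ring
      by_cases h : k + 1 < (pvFindColumnIndices columns "Full Name").length
      · have hc : (k : Int) + 1 < ((pvFindColumnIndices columns "Full Name").length : Int) := by
          exact_mod_cast Nat.cast_lt.2 h
        rw [if_pos hc, dif_pos h, hcast, PySem.List.pyGetD_natCast]
        simp [List.getD_eq_getElem?_getD, List.getElem?_eq_getElem h]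
      · have hc : ¬ ((k : Int) + 1 < ((pvFindColumnIndices columns "Full Name").length : Int)) := by
          intro hh; exact h (by exact_mod_cast hh)
        rw [if_neg hc, dif_neg h]
    simp only [hbound]

-- ===== VERDICT (by name: the statement is the Claim_ definition above) =====
theorem get_member_column_groups_py_spec : Claim_equal_get_member_column_groups_py := by
  intro columns _
  unfold Spec_get_member_column_groups_py
  rw [pvABridge]
  unfold get_member_column_groups_py_alt
  rw [pvMainFold, List.reverse_reverse]
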